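-- pv_equiv track=rewrite | github.com/DomingosR/Leetcode-Problems | 1338-Reduce-Array-Size-to-The-Half.py | reduceToHalf
-- ===== SOURCE A (Python) =====
-- from collections import Counter
--
-- def reduceToHalf(inputArray):
--     target = (len(inputArray) + 1) // 2
--     frequency = Counter(inputArray).most_common()
--
--     count, i = 0, 0
--     while count < target:
--         count += frequency[i][1]
--         i += 1
--
--     return i
-- ===== SOURCE B (Python) =====
-- def reduceToHalf(inputArray):
--     n = len(inputArray)
--     target = (n + 1) // 2
--     counts = {}
--     for x in inputArray:
--         counts[x] = counts.get(x, 0) + 1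
--     buckets = {}
--     for c in counts.values():
--         buckets[c] = buckets.get(c, 0) + 1
--     removed, ans = 0, 0
--     for c in range(n, 0, -1):
--         if removed >= target:
--             break
--         k = min(buckets.get(c, 0), (target - removed + c - 1) // c)
--         removed += k * c
--         ans += k
--     return ans
-- ===== Notes on version B (the rewrite author's own statement) =====
-- stated objective: alternative
-- what changed: Replaces Counter.most_common (a comparison sort of all (value,count) pairs) plus an element-by-element greedy while loop by a frequency-of-frequencies table scanned over the countdown range(n,0,-1), consuming each whole bucket in one ceiling-division arithmetic step (k = min(bucket, ceil((target-removed)/c))) with no sort and no per-element inner loop.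
import Mathlib
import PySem

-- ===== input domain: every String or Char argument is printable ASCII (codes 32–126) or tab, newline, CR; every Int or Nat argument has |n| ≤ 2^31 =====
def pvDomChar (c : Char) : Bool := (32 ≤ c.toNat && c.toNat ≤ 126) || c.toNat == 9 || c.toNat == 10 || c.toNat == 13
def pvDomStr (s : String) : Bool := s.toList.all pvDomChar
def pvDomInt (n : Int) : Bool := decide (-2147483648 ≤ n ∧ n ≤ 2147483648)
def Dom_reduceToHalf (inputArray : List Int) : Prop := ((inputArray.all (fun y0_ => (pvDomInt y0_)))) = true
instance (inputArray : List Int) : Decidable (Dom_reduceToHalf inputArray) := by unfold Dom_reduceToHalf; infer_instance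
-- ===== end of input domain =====

-- B replaces Counter.most_common's comparison sort + per-element greedy while loop by a
-- frequency-of-frequencies table scanned over the countdown range n..1, consuming each
-- bucket in one ceiling-division arithmetic step; an alternative decomposition, not claimed faster.


-- ===== PORT A =====
-- A: most_common() = sorted(items, key=count, reverse=True); the while loop with index i
-- is transliterated as structural recursion walking the frequency list while carrying i
-- (the [] ∧ count < target case is Python's IndexError, unreachable since the counts sum to len).
def pvALoop (target : Int) : Int → Int → List (Int × Int) → Int
  | _, i, [] => i
  | count, i, p :: t =>
    if count < target then pvALoop target (count + p.2) (i + 1) t else i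

def reduceToHalf (inputArray : List Int) : Int :=
  let target : Int := PySem.Int.floordiv ((inputArray.length : Int) + 1) 2
  let frequency : List (Int × Int) :=
    PySem.List.sorted (PySem.Dict.counter inputArray).items (fun p => p.2) true
  pvALoop target 0 0 frequency

-- ===== PORT B =====
def reduceToHalf_alt (inputArray : List Int) : Int :=
  let n : Int := (inputArray.length : Int)
  let target : Int := PySem.Int.floordiv (n + 1) 2
  let counts : PySem.Dict Int Int :=
    inputArray.foldl (fun d x => d.insert x (d.getD x 0 + 1)) PySem.Dict.empty
  let buckets : PySem.Dict Int Int :=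
    counts.values.foldl (fun d c => d.insert c (d.getD c 0 + 1)) PySem.Dict.empty
  -- 'if removed >= target: break' is ported as the state-freezing guard of the fold
  let st :=
    (PySem.List.pyRange n 0 (-1)).foldl
      (fun (st : Int × Int) c =>
        if st.1 < target then
          let k := min (buckets.getD c 0)
                       (PySem.Int.floordiv (target - st.1 + c - 1) c)
          (st.1 + k * c, st.2 + k)
        else st)
      ((0 : Int), (0 : Int))
  st.2

-- ===== PRECONDITION & SPEC =====
def Spec_reduceToHalf (inputArray : List Int) (out : Int) : Prop := out = reduceToHalf_alt inputArray
instance (inputArray : List Int) (out : Int) : Decidable (Spec_reduceToHalf inputArray out) := by unfold Spec_reduceToHalf; infer_instance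

-- ===== CLAIM (what is proved, stated in full; the proofs are below) =====
def Claim_equal_reduceToHalf : Prop := ∀ (inputArray : List Int), Dom_reduceToHalf inputArray → Spec_reduceToHalf inputArray (reduceToHalf inputArray)

-- ===== LEMMAS AND PROOFS =====

-- The guarded take step A performs on a single count c.
def pvStep (t : Int) (st : Int × Int) (c : Int) : Int × Int :=
  if st.1 < t then (st.1 + c, st.2 + 1) else st

-- Number of counts taken greedily from cs until the accumulator reaches t.
def pvGreedy (t : Int) (acc : Int) : List Int → Int
  | [] => 0
  | c :: cs => if acc < t then 1 + pvGreedy t (acc + c) cs else 0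

theorem pvALoop_eq (t : Int) (rest : List (Int × Int)) (count i : Int) :
    pvALoop t count i rest = i + pvGreedy t count (rest.map (·.2)) := by
  induction rest generalizing count i with
  | nil => simp [pvALoop, pvGreedy]
  | cons p tl ih =>
      by_cases h : count < t
      · simp only [pvALoop, h, if_pos, List.map_cons, pvGreedy, ih]
        ring
      · simp [pvALoop, h, List.map_cons, pvGreedy]

theorem pvStep_frozen (t : Int) (cs : List Int) (st : Int × Int) (h : ¬ st.1 < t) :
    cs.foldl (pvStep t) st = st := by
  induction cs with
  | nil => rfl
  | cons c tl ih => simp [List.foldl_cons, pvStep, h, ih]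

theorem pvFoldl_step_snd (t : Int) (cs : List Int) (r a : Int) :
    (cs.foldl (pvStep t) (r, a)).2 = a + pvGreedy t r cs := by
  induction cs generalizing r a with
  | nil => simp [pvGreedy]
  | cons c tl ih =>
      by_cases h : r < t
      · simp only [List.foldl_cons, pvStep, h, if_pos, pvGreedy, ih]
        ring
      · rw [List.foldl_cons, pvStep, if_neg h, pvStep_frozen t tl (r, a) h]
        simp [pvGreedy, h]

-- B's ceiling-arithmetic bucket step equals b guarded unit steps on count c.
theorem pvBucket_eq (t c : Int) (hc : 1 ≤ c) (b : Nat) (r a : Int) :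
    (List.replicate b c).foldl (pvStep t) (r, a)
      = if r < t then
          (r + min (b : Int) (PySem.Int.floordiv (t - r + c - 1) c) * c,
           a + min (b : Int) (PySem.Int.floordiv (t - r + c - 1) c))
        else (r, a) := by
  induction b generalizing r a with
  | zero =>
      by_cases h : r < t
      · have h0 : (0 : Int) ≤ PySem.Int.floordiv (t - r + c - 1) c := by
          rw [PySem.Int.floordiv_eq_ediv_of_pos (by omega)]
          exact Int.ediv_nonneg (by omega) (by omega)
        simp [h, min_eq_left h0]
      · simp [h]
  | succ b ih =>
      by_cases h : r < t
      · rw [List.replicate_succ, List.foldl_cons]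
        have hstep : pvStep t (r, a) c = (r + c, a + 1) := by simp [pvStep, h]
        rw [hstep, ih]
        have hK : PySem.Int.floordiv (t - r + c - 1) c
            = PySem.Int.floordiv (t - r - 1) c + 1 := by
          rw [PySem.Int.floordiv_eq_ediv_of_pos (by omega),
              PySem.Int.floordiv_eq_ediv_of_pos (by omega)]
          have : t - r + c - 1 = (t - r - 1) + 1 * c := by ring
          rw [this, Int.add_mul_ediv_right _ _ (by omega : c ≠ 0)]
        by_cases h2 : r + c < t
        · have hK' : PySem.Int.floordiv (t - (r + c) + c - 1) c
              = PySem.Int.floordiv (t - r - 1) c := by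
            congr 1; ring
          rw [if_pos h2, if_pos h, hK, hK']
          have : min ((b : Int) + 1) (PySem.Int.floordiv (t - r - 1) c + 1)
              = min (b : Int) (PySem.Int.floordiv (t - r - 1) c) + 1 := by omega
          push_cast
          rw [this]
          simp only [Prod.mk.injEq]
          constructor <;> ring
        · rw [if_neg h2, if_pos h, hK]
          have hz : PySem.Int.floordiv (t - r - 1) c = 0 := by
            rw [PySem.Int.floordiv_eq_ediv_of_pos (by omega)]
            exact Int.ediv_eq_zero_of_lt (by omega) (by omega)
          rw [hz]
          have : min ((b : Nat).succ : Int) (0 + 1) = 1 := by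
            have : (0:Int) ≤ (b : Int) := by positivity
            omega
          push_cast at this ⊢
          rw [this]
          norm_num
      · rw [pvStep_frozen t _ _ h, if_neg h]

theorem pvOuter_eq_flat (t : Int) (m : Int → Nat) (ks : List Int) (st : Int × Int) :
    ks.foldl (fun st c => (List.replicate (m c) c).foldl (pvStep t) st) st
      = (ks.flatMap (fun c => List.replicate (m c) c)).foldl (pvStep t) st := by
  induction ks generalizing st with
  | nil => rfl
  | cons k tl ih => simp [List.foldl_cons, List.flatMap_cons, List.foldl_append, ih]

theorem pvCount_flat (m : Int → Nat) (ks : List Int) (hnd : ks.Nodup) (x : Int) :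
    (ks.flatMap (fun c => List.replicate (m c) c)).count x
      = if x ∈ ks then m x else 0 := by
  induction ks with
  | nil => simp
  | cons k tl ih =>
      rcases List.nodup_cons.mp hnd with ⟨hk, htl⟩
      rw [List.flatMap_cons, List.count_append, ih htl]
      by_cases hx : x = k
      · subst hx
        simp [hk]
      · simp [List.count_replicate, List.mem_cons, hx, Ne.symm hx]

theorem pvPairwise_flat (m : Int → Nat) (ks : List Int)
    (h : ks.Pairwise (fun a b => b ≤ a)) :
    (ks.flatMap (fun c => List.replicate (m c) c)).Pairwise (fun a b => b ≤ a) := by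
  induction ks with
  | nil => simp
  | cons k tl ih =>
      rw [List.flatMap_cons, List.pairwise_append]
      rcases List.pairwise_cons.mp h with ⟨hk, htl⟩
      refine ⟨?_, ih htl, ?_⟩
      · exact List.pairwise_replicate.mpr (Or.inr le_rfl)
      · intro a ha b hb
        rcases List.mem_flatMap.mp hb with ⟨c, hc, hbc⟩
        rw [List.eq_of_mem_replicate ha, List.eq_of_mem_replicate hbc]
        exact hk c hc

-- Every Counter value is a positive count bounded by the list length.
theorem pvValues_bounds (l : List Int) (v : Int)
    (hv : v ∈ (PySem.Dict.counter l).values) :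
    1 ≤ v ∧ v ≤ (l.length : Int) := by
  rw [PySem.Dict.values_eq_map_keys _ (PySem.Dict.nodup_keys_counter l) 0] at hv
  rcases List.mem_map.mp hv with ⟨k, hk, rfl⟩
  rw [PySem.Dict.keys_counter] at hk
  rw [PySem.Dict.getD_counter]
  have hmem : k ∈ l := (PySem.Set.mem_ofList l k).mp hk
  constructor
  · exact_mod_cast List.one_le_count_iff.mpr hmem
  · exact_mod_cast List.count_le_length

-- Two ≥-sorted integer lists that are permutations of each other are equal.
theorem pvSorted_perm_eq (l1 l2 : List Int)
    (hp : l1.Perm l2)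
    (h1 : l1.Pairwise (fun a b : Int => b ≤ a))
    (h2 : l2.Pairwise (fun a b : Int => b ≤ a)) : l1 = l2 :=
  List.Perm.eq_of_pairwise (fun _ _ _ _ hab hba => le_antisymm hba hab) h1 h2 hp

-- A's descending count list equals B's countdown-range flattening of the bucket table.
theorem pvCounts_eq (inputArray : List Int) :
    ((PySem.List.sorted (PySem.Dict.counter inputArray).items (fun p => p.2) true).map
        (fun p => p.2))
      = ((PySem.List.pyRange (inputArray.length : Int) 0 (-1)).flatMap
          (fun c => List.replicate
            (((PySem.Dict.counter inputArray).values.count c)) c)) := by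
  set n : Int := (inputArray.length : Int) with hn
  set vs := (PySem.Dict.counter inputArray).values with hvs
  have hrange_nd : (PySem.List.pyRange n 0 (-1)).Nodup := by
    rw [PySem.List.pyRange_neg_one_eq_reverse]
    exact List.nodup_reverse.mpr (PySem.List.nodup_pyRange_one _ _)
  apply pvSorted_perm_eq
  · have h1 : ((PySem.List.sorted (PySem.Dict.counter inputArray).items (fun p => p.2) true).map
        (fun p => p.2)).Perm vs := by
      have := (PySem.List.sorted_perm (PySem.Dict.counter inputArray).items (fun p => p.2) true).map
        (fun p : Int × Int => p.2)
      simpa [PySem.Dict.values] using this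
    refine h1.trans (List.perm_iff_count.mpr fun x => ?_).symm
    rw [pvCount_flat _ _ hrange_nd x]
    by_cases hx : x ∈ vs
    · rw [if_pos]
      rw [PySem.List.mem_pyRange_neg_one]
      have := pvValues_bounds inputArray x hx
      omega
    · rw [List.count_eq_zero_of_not_mem hx]
      split <;> rfl
  · exact List.Pairwise.map _ (fun a b h => h)
      (PySem.List.sorted_pairwise_rev (PySem.Dict.counter inputArray).items (fun p => p.2))
  · refine pvPairwise_flat _ _ ?_
    rw [PySem.List.pyRange_neg_one_eq_reverse, List.pairwise_reverse]
    exact (PySem.List.pairwise_lt_pyRange_one _ _).imp (fun h => le_of_lt h)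

-- ===== VERDICT (by name: the statement is the Claim_ definition above) =====
theorem reduceToHalf_spec : Claim_equal_reduceToHalf := by
  intro inputArray _
  unfold Spec_reduceToHalf reduceToHalf reduceToHalf_alt
  simp only [PySem.Dict.foldl_insert_getD_add_one_eq_counter]
  set n : Int := (inputArray.length : Int) with hn
  set t : Int := PySem.Int.floordiv (n + 1) 2 with ht
  set vs := (PySem.Dict.counter inputArray).values with hvs
  -- B's fold: ceiling-arithmetic bucket steps = pvStep fold over the flattened count list
  have hb :
      ((PySem.List.pyRange n 0 (-1)).foldl
        (fun (st : Int × Int) c =>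
          if st.1 < t then
            let k := min ((PySem.Dict.counter vs).getD c 0)
                         (PySem.Int.floordiv (t - st.1 + c - 1) c)
            (st.1 + k * c, st.2 + k)
          else st)
        ((0 : Int), (0 : Int))).2
      = (0 : Int) + pvGreedy t 0
          ((PySem.List.pyRange n 0 (-1)).flatMap
            (fun c => List.replicate (vs.count c) c)) := by
    have hfold :
        ∀ (ks : List Int), (∀ c ∈ ks, 1 ≤ c) → ∀ (st : Int × Int),
          ks.foldl
            (fun (st : Int × Int) c =>
              if st.1 < t then
                let k := min ((PySem.Dict.counter vs).getD c 0)
                             (PySem.Int.floordiv (t - st.1 + c - 1) c)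
                (st.1 + k * c, st.2 + k)
              else st) st
          = ks.foldl (fun st c => (List.replicate (vs.count c) c).foldl (pvStep t) st) st := by
      intro ks hks
      induction ks with
      | nil => intro st; rfl
      | cons k tl ih =>
          intro st
          have hk1 : 1 ≤ k := hks k (List.mem_cons_self ..)
          rw [List.foldl_cons, List.foldl_cons,
              ih (fun c hc => hks c (List.mem_cons_of_mem _ hc))]
          congr 1
          rw [pvBucket_eq t k hk1 (vs.count k) st.1 st.2]
          rw [PySem.Dict.getD_counter]
    have hmem : ∀ c ∈ PySem.List.pyRange n 0 (-1), (1:Int) ≤ c := by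
      intro c hc
      rw [PySem.List.mem_pyRange_neg_one] at hc
      omega
    rw [hfold _ hmem, pvOuter_eq_flat, pvFoldl_step_snd]
  rw [hb, ← pvCounts_eq inputArray, pvALoop_eq]
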